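-- pv_equiv track=rewrite | github.com/sollyucko/random-stuff | PycharmProjects/Fractal-Dimension-Calculator/main.py | any_but_not_all
-- ===== SOURCE A (Python) =====
-- def any_but_not_all(iterable):
--     at_least_one_true = False
--     not_all_true = False
--
--     for x in iterable:
--         at_least_one_true = at_least_one_true or x
--         not_all_true = not_all_true or not x
--
--         if at_least_one_true and not_all_true:
--             return True
--
--     return False
-- ===== SOURCE B (Python) =====
-- def any_but_not_all(iterable):
--     it = iter(iterable)
--     for first in it:
--         baseline = bool(first)
--         break
--     else:
--         return False
--     for x in it:
--         if bool(x) != baseline: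
--             return True
--     return False
-- ===== Notes on version B (the rewrite author's own statement) =====
-- stated objective: alternative
-- what changed: Replaces the two-accumulator (any-true / any-false) loop with a baseline-then-detect-deviation pass: remember the truthiness of the first element and return True at the first element whose truthiness differs.
import Mathlib
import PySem

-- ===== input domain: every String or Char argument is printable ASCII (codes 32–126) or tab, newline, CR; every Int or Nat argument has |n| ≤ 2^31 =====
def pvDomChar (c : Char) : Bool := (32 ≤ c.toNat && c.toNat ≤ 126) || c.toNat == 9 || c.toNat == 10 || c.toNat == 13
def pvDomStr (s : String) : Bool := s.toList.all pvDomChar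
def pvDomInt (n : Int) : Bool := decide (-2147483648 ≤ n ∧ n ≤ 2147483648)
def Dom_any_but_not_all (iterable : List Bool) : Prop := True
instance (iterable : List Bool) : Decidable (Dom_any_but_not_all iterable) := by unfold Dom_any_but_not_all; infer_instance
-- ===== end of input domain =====

-- B changes the decomposition: instead of A's two running accumulators, it fixes the
-- truthiness of the first element as a baseline and returns at the first deviation.

-- ===== PORT A =====
-- A's for-loop over the iterable with the two boolean accumulators and early return.
def anyButNotAllLoop (atLeastOneTrue notAllTrue : Bool) : List Bool → Bool
  | [] => false
  | x :: rest =>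
      let a := atLeastOneTrue || x
      let b := notAllTrue || !x
      if a && b then true else anyButNotAllLoop a b rest

def any_but_not_all (iterable : List Bool) : Bool :=
  anyButNotAllLoop false false iterable

-- ===== PORT B =====
-- loop over the remaining elements: return true at the first truthiness deviation
def detectDeviation (baseline : Bool) : List Bool → Bool
  | [] => false
  | x :: rest => if x != baseline then true else detectDeviation baseline rest

def any_but_not_all_alt (iterable : List Bool) : Bool :=
  match iterable with
  | [] => false                      -- for-else: empty iterator
  | first :: rest => detectDeviation first rest

-- ===== PRECONDITION & SPEC =====
def Spec_any_but_not_all (iterable : List Bool) (out : Bool) : Prop := out = any_but_not_all_alt iterable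
instance (iterable : List Bool) (out : Bool) : Decidable (Spec_any_but_not_all iterable out) := by unfold Spec_any_but_not_all; infer_instance

-- ===== CLAIM (what is proved, stated in full; the proofs are below) =====
def Claim_equal_any_but_not_all : Prop := ∀ (iterable : List Bool), Dom_any_but_not_all iterable → Spec_any_but_not_all iterable (any_but_not_all iterable)

-- ===== LEMMAS AND PROOFS =====
-- After the first element x, A's accumulators are (x, !x); from that state A's loop
-- returns true exactly at the first element whose value differs from x.
theorem loop_after_first (x : Bool) (xs : List Bool) :
    anyButNotAllLoop x (!x) xs = detectDeviation x xs := by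
  induction xs with
  | nil => rfl
  | cons y ys ih =>
      cases x <;> cases y <;>
        simp [anyButNotAllLoop, detectDeviation] <;>
        simpa using ih

-- ===== VERDICT (by name: the statement is the Claim_ definition above) =====
theorem any_but_not_all_spec : Claim_equal_any_but_not_all := by
  intro iterable _
  unfold Spec_any_but_not_all any_but_not_all any_but_not_all_alt
  cases iterable with
  | nil => rfl
  | cons x xs =>
      cases x <;> simpa [anyButNotAllLoop] using loop_after_first _ xs
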